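-- pv_equiv track=rewrite | github.com/isc-projects/stork | docker/tools/gen_kea_config.py | ipv4_address_generator
-- ===== SOURCE A (Python) =====
-- def ipv4_address_generator(number_of_addresses, begin="1.0.0.0", mask=32):
--     """
--     Generates a sequence of IPv4 addresses.
--
--     Parameters
--     ----------
--     number_of_addresses : int
--         Number of addresses to generate.
--     begin : str, optional
--         A first address to generate, by default "1.0.0.0"
--     mask : int, optional
--         An address mask, the part outside mask is preserved, by default 32
--     """
--
--     def increment(address):
--         address_binary = int(
--             "".join(f"{int(octet):08b}" for octet in address.split(".")), 2
--         )
--         address_binary += 1 << (32 - mask)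
--         return ".".join(
--             str(int(address_binary >> (24 - i * 8) & 0xFF)) for i in range(4)
--         )
--
--     address = begin
--     for _ in range(number_of_addresses):
--         yield address
--         address = increment(address)
-- ===== SOURCE B (Python) =====
-- def ipv4_address_generator(number_of_addresses, begin="1.0.0.0", mask=32):
--     """
--     Generates a sequence of IPv4 addresses.
--
--     Closed-form: the k-th address is (base + k*step) mod 2**32, so each step
--     is computed directly from the index instead of re-parsing and
--     re-incrementing the previously formatted string.
--     """
--     if number_of_addresses > 0:
--         base = int("".join(f"{int(octet):08b}" for octet in begin.split(".")), 2)
--         step = 1 << (32 - mask)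
--         yield begin
--         for i in range(1, number_of_addresses):
--             v = (base + i * step) % 4294967296
--             yield f"{(v >> 24) & 0xFF}.{(v >> 16) & 0xFF}.{(v >> 8) & 0xFF}.{v & 0xFF}"
-- ===== Notes on version B (the rewrite author's own statement) =====
-- stated objective: faster
-- what changed: B parses begin into a 32-bit integer once and emits the i-th address by the closed-form value (base + i*step) mod 2^32 formatted directly, instead of A's re-formatting and re-parsing the previous address string on every step.
import Mathlib
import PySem

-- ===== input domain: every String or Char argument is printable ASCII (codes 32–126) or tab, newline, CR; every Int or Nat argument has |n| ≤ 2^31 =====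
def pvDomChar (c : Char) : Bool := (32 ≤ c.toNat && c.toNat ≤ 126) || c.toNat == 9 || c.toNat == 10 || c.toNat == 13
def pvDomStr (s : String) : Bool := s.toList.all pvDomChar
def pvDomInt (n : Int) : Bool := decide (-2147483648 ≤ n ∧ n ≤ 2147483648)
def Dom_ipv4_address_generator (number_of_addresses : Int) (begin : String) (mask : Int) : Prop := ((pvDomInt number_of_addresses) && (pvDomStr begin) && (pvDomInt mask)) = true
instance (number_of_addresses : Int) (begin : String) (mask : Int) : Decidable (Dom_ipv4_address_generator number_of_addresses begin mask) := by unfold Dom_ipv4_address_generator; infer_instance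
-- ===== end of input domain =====

-- B replaces A's per-step reformat-and-reparse accumulator by the closed form
-- (base + i*step) mod 2^32 per index; measured constant-factor faster in Python.
-- The equivalence is about the returned list (Python generators compared as lists).

-- ===== PORT A =====

-- f"{x:08b}" : binary digits zero-padded to width 8 (the sign, when present, counts into the width)
def pvPadTo (w : Nat) (ds : List Char) : List Char := List.replicate (w - ds.length) '0' ++ ds
def pvBits8 (x : Int) : List Char :=
  if x < 0 then '-' :: pvPadTo 7 (Nat.toDigits 2 x.natAbs) else pvPadTo 8 (Nat.toDigits 2 x.toNat)

-- int(s, 2), ported by hand: exact on every string this program ever feeds it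
-- (concatenations of f"{int(octet):08b}" pieces, whose characters are only '0', '1' and '-';
--  a '-' is accepted by Python only as the single leading character).
def pvBinVal (cs : List Char) : Nat := cs.foldl (fun a c => 2 * a + (if c = '1' then 1 else 0)) 0
def pvBinDigits? (cs : List Char) : Option Nat :=
  if cs ≠ [] ∧ cs.all (fun c => c = '0' || c = '1') then some (pvBinVal cs) else none
def pvInt2? (cs : List Char) : Option Int :=
  match cs with
  | [] => none
  | c :: ds =>
    if c = '-' then (pvBinDigits? ds).map (fun n => -(n : Int))
    else (pvBinDigits? (c :: ds)).map (fun n => (n : Int))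

-- "".join(f"{int(octet):08b}" for octet in parts) ; none = some int(octet) raised
def pvOctetsBits? : List String → Option (List Char)
  | [] => some []
  | o :: rest =>
    match PySem.Int.ofStr? o with
    | none => none
    | some x =>
      match pvOctetsBits? rest with
      | none => none
      | some t => some (pvBits8 x ++ t)

-- int("".join(f"{int(octet):08b}" for octet in address.split(".")), 2) ; none = ValueError
def pvParse? (s : String) : Option Int :=
  match PySem.Str.split? s "." with
  | none => none
  | some parts =>
    match pvOctetsBits? parts with
    | none => none
    | some bits => pvInt2? bits

-- ".".join(str(int(v >> (24 - i*8) & 0xFF)) for i in range(4))  (the inner int() is the identity)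
def pvFmtA (v : Int) : String :=
  PySem.Str.join "." ((PySem.List.pyRange 0 4 1).map
    (fun i => PySem.Int.toStr (PySem.Int.band (v >>> (24 - i * 8).toNat) 255)))

-- increment(address) ; none exactly where Python raises (bad octet, or negative shift 32 - mask)
def pvInc? (mask : Int) (addr : String) : Option String :=
  match pvParse? addr with
  | none => none
  | some b => if mask ≤ 32 then some (pvFmtA (b + 1 <<< (32 - mask).toNat)) else none

-- for _ in range(number_of_addresses): yield address; address = increment(address)
def ipv4AGo (mask : Int) : Nat → String → List String
  | 0, _ => []
  | k + 1, addr =>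
    addr :: (match pvInc? mask addr with
             | some nxt => ipv4AGo mask k nxt
             | none => [])   -- Python raises here; such inputs are outside Pre_

def ipv4_address_generator (number_of_addresses : Int) (begin : String) (mask : Int) : List String :=
  ipv4AGo mask number_of_addresses.toNat begin

-- ===== PORT B =====

-- f"{(v>>24)&0xFF}.{(v>>16)&0xFF}.{(v>>8)&0xFF}.{v&0xFF}"
def pvFmtB (v : Int) : String :=
  PySem.Str.join "" [PySem.Int.toStr (PySem.Int.band (v >>> 24) 255), ".",
                     PySem.Int.toStr (PySem.Int.band (v >>> 16) 255), ".",
                     PySem.Int.toStr (PySem.Int.band (v >>> 8) 255), ".",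
                     PySem.Int.toStr (PySem.Int.band v 255)]

def ipv4_address_generator_alt (number_of_addresses : Int) (begin : String) (mask : Int) : List String :=
  if number_of_addresses > 0 then
    match pvParse? begin with          -- base, via A's exact octet parse (Source B reuses the expression)
    | none => []                       -- Python raises ValueError here; outside Pre_
    | some base =>
      if mask ≤ 32 then
        let step : Int := 1 <<< (32 - mask).toNat
        begin :: (PySem.List.pyRange 1 number_of_addresses 1).map
          (fun i => pvFmtB (PySem.Int.mod (base + i * step) 4294967296))
      else []                          -- Python raises (negative shift count); outside Pre_
  else []

-- ===== PRECONDITION & SPEC =====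
-- Pre_ excludes exactly the inputs where the Python A raises: it needs at least one address
-- (n ≥ 1) together with either a begin string whose octets do not all parse as int() /
-- whose joined binary literal is invalid (ValueError), or mask > 32 (negative shift count).
-- (closed form: every dot-separated piece parses as int(); pieces after the first are ≥ 0,
--  since a '-' is only a valid binary literal at the very start of the joined digit string)
def Pre_ipv4_address_generator (number_of_addresses : Int) (begin : String) (mask : Int) : Prop :=
  number_of_addresses ≤ 0 ∨ (mask ≤ 32 ∧
    (∀ p ∈ (PySem.Str.split? begin ".").getD [], (PySem.Int.ofStr? p).isSome = true) ∧
    (∀ p ∈ ((PySem.Str.split? begin ".").getD []).tail, 0 ≤ (PySem.Int.ofStr? p).getD 0))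
instance (number_of_addresses : Int) (begin : String) (mask : Int) : Decidable (Pre_ipv4_address_generator number_of_addresses begin mask) := by unfold Pre_ipv4_address_generator; infer_instance

def pvWitness_ipv4_address_generator : Int × String × Int := (3, "10.0.0.1", 24)

def Spec_ipv4_address_generator (number_of_addresses : Int) (begin : String) (mask : Int) (out : List String) : Prop := out = ipv4_address_generator_alt number_of_addresses begin mask
instance (number_of_addresses : Int) (begin : String) (mask : Int) (out : List String) : Decidable (Spec_ipv4_address_generator number_of_addresses begin mask out) := by unfold Spec_ipv4_address_generator; infer_instance

-- ===== CLAIM (what is proved, stated in full; the proofs are below) =====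
def Claim_equal_ipv4_address_generator : Prop := ∀ (number_of_addresses : Int) (begin : String) (mask : Int), Dom_ipv4_address_generator number_of_addresses begin mask → Pre_ipv4_address_generator number_of_addresses begin mask → Spec_ipv4_address_generator number_of_addresses begin mask (ipv4_address_generator number_of_addresses begin mask)

-- ===== LEMMAS AND PROOFS =====

-- x & 255 is x mod 256 (Python semantics on every sign)
lemma pv_band255 (x : Int) : PySem.Int.band x 255 = PySem.Int.mod x 256 := by
  rw [PySem.Int.mod_eq_emod_of_pos (by norm_num : (0:Int) < 256)]
  have h255 : Int.toNat 255 = 2 ^ 8 - 1 := rfl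
  rcases x with n | n
  · simp only [PySem.Int.band, Int.ofNat_eq_natCast]
    norm_num
    rw [h255, Nat.and_two_pow_sub_one_eq_mod]
    omega
  · simp only [PySem.Int.band, Int.negSucc_eq]
    norm_num
    rw [h255, if_neg (by omega : ¬((n:Int) ≤ -1)), Nat.and_comm, Nat.and_two_pow_sub_one_eq_mod]
    omega

-- the four octet values ignore multiples of 2^32
lemma pv_oct_congr (v t : Int) (k : Nat) (hk : k ≤ 24) :
    ((v + 4294967296 * t) / 2 ^ k) % 256 = (v / 2 ^ k) % 256 := by
  have hks : k + (32 - k) = 32 := by omega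
  have h1 : (4294967296 : Int) = 2 ^ k * 2 ^ (32 - k) := by
    rw [← pow_add, hks]; norm_num
  have h2 : (256 : Int) ∣ 2 ^ (32 - k) := by
    rw [show (256 : Int) = 2 ^ 8 by norm_num]; exact pow_dvd_pow 2 (by omega)
  rw [h1, show v + 2 ^ k * 2 ^ (32 - k) * t = v + (2 ^ (32 - k) * t) * 2 ^ k by ring,
      Int.add_mul_ediv_right _ _ (by positivity : (2:Int) ^ k ≠ 0)]
  obtain ⟨d, hd⟩ := h2
  rw [hd, show v / 2 ^ k + 256 * d * t = v / 2 ^ k + 256 * (d * t) by ring,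
      Int.add_mul_emod_self_left]

-- x >> k (Python) is floor division by 2^k; the divisor is positive, so Lean's `/` (ediv) agrees
lemma pv_shrI (x : Int) (kI : Int) (k : Nat) (hk : kI = (k : Int)) : x >>> kI = x / 2 ^ k := by
  rw [hk, Int.shiftRight_natCast_right, Int.shiftRight_eq_div_pow]; norm_num

lemma pv_shr0 (x : Int) : x >>> (0 : Int) = x := by
  rw [pv_shrI x 0 0 rfl]; norm_num

-- 1 << k
lemma pv_one_shlN (k : Nat) : (((1 <<< k : Nat) : Nat) : Int) = 2 ^ k := by
  simp [Nat.shiftLeft_eq]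

lemma pv_one_shl (k : Nat) : (1 : Int) <<< k = 2 ^ k := by
  show Int.ofNat (1 <<< k) = 2 ^ k
  simp [Nat.shiftLeft_eq]

lemma pv_oct_mod (v : Int) (kI : Int) (k : Nat) (hkI : kI = (k : Int)) (hk : k ≤ 24) :
    PySem.Int.band ((PySem.Int.mod v 4294967296) >>> kI) 255 = PySem.Int.band (v >>> kI) 255 := by
  have hM : PySem.Int.mod v 4294967296 = v + 4294967296 * (-(v / 4294967296)) := by
    rw [PySem.Int.mod_eq_emod_of_pos (by norm_num : (0:Int) < 4294967296), Int.emod_def]; ring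
  rw [hM, pv_band255, pv_band255, pv_shrI _ _ _ hkI, pv_shrI _ _ _ hkI,
      PySem.Int.mod_eq_emod_of_pos (by norm_num : (0:Int) < 256),
      PySem.Int.mod_eq_emod_of_pos (by norm_num : (0:Int) < 256),
      pv_oct_congr v _ k hk]

lemma pv_oct_mod0 (v : Int) :
    PySem.Int.band (PySem.Int.mod v 4294967296) 255 = PySem.Int.band v 255 := by
  have h := pv_oct_mod v 0 0 rfl (by norm_num)
  rwa [pv_shr0, pv_shr0] at h

lemma pv_join_dot4 (a b c d : String) :
    PySem.Str.join "." [a, b, c, d] = PySem.Str.join "" [a, ".", b, ".", c, ".", d] := by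
  simp [PySem.Str.join, PySem.Chars.join, List.intercalate, List.intersperse]

-- the two format helpers print the same string
lemma pv_fmtAB (v : Int) : pvFmtA v = pvFmtB (PySem.Int.mod v 4294967296) := by
  have h : PySem.List.pyRange 0 4 1 = [0, 1, 2, 3] := by decide
  unfold pvFmtA pvFmtB
  rw [h]
  simp only [List.map]
  rw [show ((((24:Int) - 0 * 8).toNat : Nat) : Int) = (((24:Nat)) : Int) from rfl,
      show ((((24:Int) - 1 * 8).toNat : Nat) : Int) = (((16:Nat)) : Int) from rfl,
      show ((((24:Int) - 2 * 8).toNat : Nat) : Int) = (((8:Nat)) : Int) from rfl,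
      show ((((24:Int) - 3 * 8).toNat : Nat) : Int) = (((0:Nat)) : Int) from rfl,
      show (((0:Nat)) : Int) = (0 : Int) from rfl, pv_shr0,
      ← pv_oct_mod v ((24:Nat) : Int) 24 rfl (by norm_num),
      ← pv_oct_mod v ((16:Nat) : Int) 16 rfl (by norm_num),
      ← pv_oct_mod v ((8:Nat) : Int) 8 rfl (by norm_num),
      ← pv_oct_mod0 v]
  have hc24 : (((24:Nat)) : Int) = (24 : Int) := by norm_num
  have hc16 : (((16:Nat)) : Int) = (16 : Int) := by norm_num
  have hc8 : (((8:Nat)) : Int) = (8 : Int) := by norm_num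
  rw [hc24, hc16, hc8]
  exact pv_join_dot4 _ _ _ _

-- the facts about a single octet value 0..255 are finite, checked by the kernel
set_option maxRecDepth 100000 in
lemma pv_fin_facts : ∀ o : Fin 256,
    PySem.Int.ofChars? (PySem.Int.toChars (o.val : Int)) = some (o.val : Int) ∧
    '.' ∉ PySem.Int.toChars (o.val : Int) ∧
    (pvBits8 (o.val : Int)).length = 8 ∧
    (pvBits8 (o.val : Int)).all (fun c => c = '0' || c = '1') = true ∧
    pvBinVal (pvBits8 (o.val : Int)) = o.val := by decide

-- splitOn/intercalate machinery for re-parsing a formatted address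
lemma pv_go_nil (fuel : Nat) (cur : List Char) (acc : List (List Char)) :
    PySem.Chars.splitOn.go ['.'] fuel [] cur acc = (cur.reverse :: acc).reverse := by
  cases fuel
  · rw [PySem.Chars.splitOn.go.eq_def]; simp
  · rw [PySem.Chars.splitOn.go.eq_def]

lemma pv_go_skip (xs : List Char) (hxs : '.' ∉ xs) :
    ∀ (fuel : Nat) (l cur : List Char) (acc : List (List Char)),
      xs.length + l.length ≤ fuel →
      PySem.Chars.splitOn.go ['.'] fuel (xs ++ l) cur acc =
      PySem.Chars.splitOn.go ['.'] (fuel - xs.length) l (xs.reverse ++ cur) acc := by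
  induction xs with
  | nil => intro fuel l cur acc _; simp
  | cons c t ih =>
    intro fuel l cur acc hf
    have hc : c ≠ '.' := fun h => hxs (by simp [h])
    have ht : '.' ∉ t := fun h => hxs (by simp [h])
    obtain ⟨f, rfl⟩ : ∃ f, fuel = f + 1 := ⟨fuel - 1, by simp at hf; omega⟩
    rw [PySem.Chars.splitOn.go.eq_def]
    simp only [List.cons_append]
    rw [if_neg (by simp [List.isPrefixOf]; exact fun h => hc h.symm)]
    rw [ih ht f l (c :: cur) acc (by simp at hf ⊢; omega)]
    simp [List.reverse_cons, List.append_assoc]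

lemma pv_go_dot (f : Nat) (l cur : List Char) (acc : List (List Char)) :
    PySem.Chars.splitOn.go ['.'] (f + 1) ('.' :: l) cur acc =
    PySem.Chars.splitOn.go ['.'] f l [] (cur.reverse :: acc) := by
  rw [PySem.Chars.splitOn.go.eq_def]
  simp [List.isPrefixOf]

lemma pv_go_inter (ps : List (List Char)) (hne : ps ≠ [])
    (hp : ∀ p ∈ ps, '.' ∉ p) :
    ∀ (fuel : Nat) (acc : List (List Char)),
      (List.intercalate ['.'] ps).length + 1 ≤ fuel →
      PySem.Chars.splitOn.go ['.'] fuel (List.intercalate ['.'] ps) [] acc =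
      acc.reverse ++ ps := by
  induction ps with
  | nil => exact absurd rfl hne
  | cons p ps ih =>
    intro fuel acc hf
    rcases ps with _ | ⟨q, ps'⟩
    · have h1 : List.intercalate ['.'] [p] = p := by simp [List.intercalate]
      rw [h1] at hf ⊢
      rw [show p = p ++ [] by simp] at hf ⊢
      rw [pv_go_skip p (hp p (by simp)) fuel [] [] acc (by simp at hf ⊢; omega)]
      rw [pv_go_nil]
      simp
    · have hint : List.intercalate ['.'] (p :: q :: ps') = p ++ '.' :: List.intercalate ['.'] (q :: ps') := by
        simp [List.intercalate, List.intersperse]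
      rw [hint] at hf ⊢
      rw [pv_go_skip p (hp p (by simp)) fuel _ [] acc (by simp at hf ⊢; omega)]
      obtain ⟨f, hfe⟩ : ∃ f, fuel - p.length = f + 1 := ⟨fuel - p.length - 1, by simp at hf; omega⟩
      rw [hfe, pv_go_dot]
      rw [ih (by simp) (fun r hr => hp r (by simp [hr])) f _ (by simp at hf ⊢; omega)]
      simp

lemma pv_splitOn_inter (ps : List (List Char)) (hne : ps ≠ [])
    (hp : ∀ p ∈ ps, '.' ∉ p) :
    PySem.Chars.splitOn (List.intercalate ['.'] ps) ['.'] = ps := by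
  unfold PySem.Chars.splitOn
  rw [pv_go_inter ps hne hp _ [] (by omega)]
  simp


-- value of a digit string under the fold, from an arbitrary accumulator
lemma pv_binVal_from (cs : List Char) :
    ∀ acc : Nat, cs.foldl (fun a c => 2 * a + (if c = '1' then 1 else 0)) acc
      = acc * 2 ^ cs.length + pvBinVal cs := by
  induction cs with
  | nil => intro acc; simp [pvBinVal]
  | cons c t ih =>
    intro acc
    show t.foldl _ (2 * acc + _) = _
    rw [ih (2 * acc + (if c = '1' then 1 else 0))]
    have : pvBinVal (c :: t) = (if c = '1' then 1 else 0) * 2 ^ t.length + pvBinVal t := by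
      show t.foldl _ (2 * 0 + _) = _
      rw [ih (2 * 0 + (if c = '1' then 1 else 0))]
      ring_nf
    rw [this]
    simp only [List.length_cons, pow_succ]
    split_ifs <;> ring
lemma pv_binVal_append (a b : List Char) :
    pvBinVal (a ++ b) = pvBinVal a * 2 ^ b.length + pvBinVal b := by
  show (a ++ b).foldl _ 0 = _
  rw [List.foldl_append, pv_binVal_from b]
  rfl

lemma pv_bits8_facts (x : Int) (h0 : 0 ≤ x) (h1 : x < 256) :
    (pvBits8 x).length = 8 ∧ (pvBits8 x).all (fun c => c = '0' || c = '1') = true ∧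
    pvBinVal (pvBits8 x) = x.toNat := by
  obtain ⟨-, -, ha, hb, hc⟩ := pv_fin_facts ⟨x.toNat, by omega⟩
  rw [Int.toNat_of_nonneg h0] at ha hb hc
  exact ⟨ha, hb, hc⟩

lemma pv_int2_concat (x3 x2 x1 x0 : Int)
    (h3 : 0 ≤ x3 ∧ x3 < 256) (h2 : 0 ≤ x2 ∧ x2 < 256)
    (h1 : 0 ≤ x1 ∧ x1 < 256) (h0 : 0 ≤ x0 ∧ x0 < 256) :
    pvInt2? (pvBits8 x3 ++ (pvBits8 x2 ++ (pvBits8 x1 ++ (pvBits8 x0 ++ [])))) =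
      some (x3 * 16777216 + x2 * 65536 + x1 * 256 + x0) := by
  obtain ⟨hl3, hb3, hv3⟩ := pv_bits8_facts x3 h3.1 h3.2
  obtain ⟨hl2, hb2, hv2⟩ := pv_bits8_facts x2 h2.1 h2.2
  obtain ⟨hl1, hb1, hv1⟩ := pv_bits8_facts x1 h1.1 h1.2
  obtain ⟨hl0, hb0, hv0⟩ := pv_bits8_facts x0 h0.1 h0.2
  simp only [List.append_nil]
  obtain ⟨c, t, hct⟩ : ∃ c t, pvBits8 x3 = c :: t := by
    rcases h : pvBits8 x3 with _ | ⟨c, t⟩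
    · rw [h] at hl3; simp at hl3
    · exact ⟨c, t, rfl⟩
  have hcbin : c = '0' ∨ c = '1' := by
    have := hb3; rw [hct] at this; simp [List.all_cons] at this
    rcases this with ⟨hc, -⟩
    rcases hc with h | h <;> [left; right] <;> exact h
  have hcne : c ≠ '-' := by rcases hcbin with h | h <;> rw [h] <;> decide
  rw [hct, List.cons_append]
  show pvInt2? (c :: (t ++ (pvBits8 x2 ++ (pvBits8 x1 ++ pvBits8 x0)))) = _
  rw [pvInt2?]
  rw [if_neg hcne]
  have hall : ((c :: (t ++ (pvBits8 x2 ++ (pvBits8 x1 ++ pvBits8 x0)))).all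
      (fun c => c = '0' || c = '1')) = true := by
    have h3' := hb3; rw [hct] at h3'
    simp [List.all_append, List.all_cons] at h3' ⊢
    refine ⟨h3'.1, h3'.2, ?_, ?_, ?_⟩ <;> [skip; skip; skip]
    · intro a ha; have := hb2; simp [List.all_eq_true] at this; exact this a ha
    · intro a ha; have := hb1; simp [List.all_eq_true] at this; exact this a ha
    · intro a ha; have := hb0; simp [List.all_eq_true] at this; exact this a ha
  rw [pvBinDigits?, if_pos ⟨by simp, hall⟩]
  rw [show (c :: (t ++ (pvBits8 x2 ++ (pvBits8 x1 ++ pvBits8 x0)))) =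
        ((c :: t) ++ (pvBits8 x2 ++ (pvBits8 x1 ++ pvBits8 x0))) by simp, ← hct]
  rw [pv_binVal_append, pv_binVal_append, pv_binVal_append]
  simp only [List.length_append, hl2, hl1, hl0, hv3, hv2, hv1, hv0]
  have e3 : (x3.toNat : Int) = x3 := Int.toNat_of_nonneg h3.1
  have e2 : (x2.toNat : Int) = x2 := Int.toNat_of_nonneg h2.1
  have e1 : (x1.toNat : Int) = x1 := Int.toNat_of_nonneg h1.1
  have e0 : (x0.toNat : Int) = x0 := Int.toNat_of_nonneg h0.1
  simp only [Option.bind_some, Option.bind_eq_bind]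
  push_cast [e3, e2, e1, e0]
  show some (x3 * 16777216 + (x2 * 65536 + (x1 * 256 + x0))) = _
  congr 1
  ring


-- octet helper: x & 255 after x >> k, as arithmetic
def pvOctV (v : Int) (k : Nat) : Int := PySem.Int.mod (v / 2 ^ k) 256

lemma pv_band_oct (v : Int) (kI : Int) (k : Nat) (h : kI = (k : Int)) :
    PySem.Int.band (v >>> kI) 255 = pvOctV v k := by
  rw [pv_band255, pv_shrI _ _ _ h]; rfl

lemma pv_octV_bounds (v : Int) (k : Nat) : 0 ≤ pvOctV v k ∧ pvOctV v k < 256 :=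
  ⟨PySem.Int.mod_nonneg _ (by norm_num), PySem.Int.mod_lt _ (by norm_num)⟩

lemma pv_octet_str (x : Int) (h0 : 0 ≤ x) (h1 : x < 256) :
    PySem.Int.ofChars? (PySem.Int.toChars x) = some x ∧ '.' ∉ PySem.Int.toChars x := by
  obtain ⟨ha, hb, -⟩ := pv_fin_facts ⟨x.toNat, by omega⟩
  rw [Int.toNat_of_nonneg h0] at ha hb
  exact ⟨ha, hb⟩

lemma pv_join4_ofList (a b c d : Int) :
    PySem.Str.join "." [PySem.Int.toStr a, PySem.Int.toStr b, PySem.Int.toStr c, PySem.Int.toStr d]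
      = String.ofList (List.intercalate ['.']
          [PySem.Int.toChars a, PySem.Int.toChars b, PySem.Int.toChars c, PySem.Int.toChars d]) := by
  simp [PySem.Str.join, PySem.Chars.join, PySem.Int.toList_toStr]

lemma pv_fmtA_toList (v : Int) :
    pvFmtA v = String.ofList (List.intercalate ['.']
      [PySem.Int.toChars (pvOctV v 24), PySem.Int.toChars (pvOctV v 16),
       PySem.Int.toChars (pvOctV v 8), PySem.Int.toChars (pvOctV v 0)]) := by
  have h : PySem.List.pyRange 0 4 1 = [0, 1, 2, 3] := by decide
  unfold pvFmtA
  rw [h]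
  simp only [List.map]
  rw [show ((((24:Int) - 0 * 8).toNat : Nat) : Int) = (((24:Nat)) : Int) from rfl,
      show ((((24:Int) - 1 * 8).toNat : Nat) : Int) = (((16:Nat)) : Int) from rfl,
      show ((((24:Int) - 2 * 8).toNat : Nat) : Int) = (((8:Nat)) : Int) from rfl,
      show ((((24:Int) - 3 * 8).toNat : Nat) : Int) = (((0:Nat)) : Int) from rfl,
      pv_band_oct v _ 24 rfl, pv_band_oct v _ 16 rfl, pv_band_oct v _ 8 rfl,
      pv_band_oct v _ 0 rfl]
  exact pv_join4_ofList _ _ _ _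

-- re-parsing a formatted address gives its value mod 2^32
lemma pv_roundtrip (v : Int) : pvParse? (pvFmtA v) = some (PySem.Int.mod v 4294967296) := by
  obtain ⟨h024, h124⟩ := pv_octV_bounds v 24
  obtain ⟨h016, h116⟩ := pv_octV_bounds v 16
  obtain ⟨h08, h18⟩ := pv_octV_bounds v 8
  obtain ⟨h00, h10⟩ := pv_octV_bounds v 0
  obtain ⟨hr24, hd24⟩ := pv_octet_str _ h024 h124
  obtain ⟨hr16, hd16⟩ := pv_octet_str _ h016 h116
  obtain ⟨hr8, hd8⟩ := pv_octet_str _ h08 h18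
  obtain ⟨hr0, hd0⟩ := pv_octet_str _ h00 h10
  rw [pv_fmtA_toList]
  unfold pvParse?
  rw [show PySem.Str.split? (String.ofList (List.intercalate ['.']
        [PySem.Int.toChars (pvOctV v 24), PySem.Int.toChars (pvOctV v 16),
         PySem.Int.toChars (pvOctV v 8), PySem.Int.toChars (pvOctV v 0)])) "."
      = some ((PySem.Chars.splitOn (List.intercalate ['.']
        [PySem.Int.toChars (pvOctV v 24), PySem.Int.toChars (pvOctV v 16),
         PySem.Int.toChars (pvOctV v 8), PySem.Int.toChars (pvOctV v 0)]) ['.']).map String.ofList)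
      by simp [PySem.Str.split?, PySem.Chars.split?, String.toList_ofList]]
  rw [pv_splitOn_inter _ (by simp) (by
      intro p hp
      simp only [List.mem_cons, List.not_mem_nil, or_false] at hp
      rcases hp with rfl | rfl | rfl | rfl <;> assumption)]
  have e : pvOctetsBits? [String.ofList (PySem.Int.toChars (pvOctV v 24)),
      String.ofList (PySem.Int.toChars (pvOctV v 16)),
      String.ofList (PySem.Int.toChars (pvOctV v 8)),
      String.ofList (PySem.Int.toChars (pvOctV v 0))]
      = some (pvBits8 (pvOctV v 24) ++ (pvBits8 (pvOctV v 16) ++ (pvBits8 (pvOctV v 8) ++ (pvBits8 (pvOctV v 0) ++ [])))) := by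
    simp [pvOctetsBits?, PySem.Int.ofStr?_ofList, hr24, hr16, hr8, hr0]
  simp only [List.map]
  rw [e]
  show pvInt2? (pvBits8 (pvOctV v 24) ++ (pvBits8 (pvOctV v 16) ++ (pvBits8 (pvOctV v 8) ++ (pvBits8 (pvOctV v 0) ++ [])))) = _
  rw [pv_int2_concat _ _ _ _ ⟨h024, h124⟩ ⟨h016, h116⟩ ⟨h08, h18⟩ ⟨h00, h10⟩]
  congr 1
  unfold pvOctV
  rw [PySem.Int.mod_eq_emod_of_pos (by norm_num : (0:Int) < 4294967296)]
  simp only [PySem.Int.mod_eq_emod_of_pos (by norm_num : (0:Int) < 256)]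
  norm_num
  omega

-- increment, on a parsed address, adds the step and formats
lemma pv_inc_fmt (mask : Int) (hm : mask ≤ 32) (v : Int) :
    pvInc? mask (pvFmtA v) =
      some (pvFmtA (PySem.Int.mod v 4294967296 + 2 ^ (32 - mask).toNat)) := by
  unfold pvInc?
  rw [pv_roundtrip v]
  simp [hm, pv_one_shl]

-- PySem.Int.mod by 2^32 absorbs an inner mod
lemma pv_mod_absorb (v c : Int) :
    PySem.Int.mod (PySem.Int.mod v 4294967296 + c) 4294967296 =
      PySem.Int.mod (v + c) 4294967296 := by
  simp only [PySem.Int.mod_eq_emod_of_pos (by norm_num : (0:Int) < 4294967296)]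
  exact Int.emod_add_emod v 4294967296 c

-- the loop of A, started at a formatted address, is the closed-form map of B
lemma pv_goA (mask : Int) (hm : mask ≤ 32) (k : Nat) :
    ∀ v : Int, ipv4AGo mask k (pvFmtA v) =
      (List.range k).map (fun (j : Nat) =>
        pvFmtB (PySem.Int.mod (v + (j : Int) * 2 ^ (32 - mask).toNat) 4294967296)) := by
  induction k with
  | zero => intro v; simp [ipv4AGo]
  | succ k ih =>
    intro v
    rw [ipv4AGo, pv_inc_fmt mask hm v]
    show pvFmtA v :: ipv4AGo mask k (pvFmtA (PySem.Int.mod v 4294967296 + 2 ^ (32 - mask).toNat)) = _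
    rw [ih (PySem.Int.mod v 4294967296 + 2 ^ (32 - mask).toNat)]
    rw [List.range_succ_eq_map, List.map_cons, List.map_map]
    congr 1
    · rw [pv_fmtAB v]
      congr 1
      ring_nf
    · apply List.map_congr_left
      intro j hj
      simp only [Function.comp_apply]
      rw [show PySem.Int.mod v 4294967296 + 2 ^ (32 - mask).toNat + (j : Int) * 2 ^ (32 - mask).toNat
            = PySem.Int.mod v 4294967296 + (2 ^ (32 - mask).toNat + (j : Int) * 2 ^ (32 - mask).toNat) by ring,
          pv_mod_absorb]
      congr 2
      push_cast
      ring

-- the characters printed by Nat.toDigits 2 are binary digits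
lemma pv_toDigitsCore_binary : ∀ (fuel n : Nat) (acc : List Char),
    (∀ c ∈ acc, c = '0' ∨ c = '1') →
    ∀ c ∈ Nat.toDigitsCore 2 fuel n acc, c = '0' ∨ c = '1' := by
  intro fuel
  induction fuel with
  | zero => intro n acc hacc; simpa [Nat.toDigitsCore] using hacc
  | succ f ih =>
    intro n acc hacc
    rw [Nat.toDigitsCore]
    have hd : (n % 2).digitChar = '0' ∨ (n % 2).digitChar = '1' := by
      have : n % 2 = 0 ∨ n % 2 = 1 := by omega
      rcases this with h | h <;> rw [h] <;> simp [Nat.digitChar]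
    have hacc' : ∀ c ∈ (n % 2).digitChar :: acc, c = '0' ∨ c = '1' := by
      intro c hc
      rcases List.mem_cons.mp hc with rfl | hc
      · exact hd
      · exact hacc c hc
    split_ifs with h
    · exact hacc'
    · exact ih (n / 2) _ hacc'

lemma pv_toDigits_binary (n : Nat) : ∀ c ∈ Nat.toDigits 2 n, c = '0' ∨ c = '1' :=
  pv_toDigitsCore_binary (n + 1) n [] (by simp)

lemma pv_toDigitsCore_ne_nil : ∀ (fuel n : Nat) (acc : List Char), acc ≠ [] →
    Nat.toDigitsCore 2 fuel n acc ≠ [] := by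
  intro fuel
  induction fuel with
  | zero => intro n acc h; simpa [Nat.toDigitsCore] using h
  | succ f ih =>
    intro n acc h
    rw [Nat.toDigitsCore]
    split_ifs with hz
    · simp
    · exact ih (n / 2) _ (by simp)

lemma pv_toDigits_ne_nil (n : Nat) : Nat.toDigits 2 n ≠ [] := by
  unfold Nat.toDigits
  rcases h : Nat.toDigitsCore 2 (n + 1) n [] with _ | _
  · rw [Nat.toDigitsCore] at h
    split_ifs at h
    exact absurd h (pv_toDigitsCore_ne_nil _ _ _ (by simp))
  · simp


lemma pv_bits8_shape_nonneg (x : Int) (h : 0 ≤ x) :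
    pvBits8 x ≠ [] ∧ ∀ c ∈ pvBits8 x, c = '0' ∨ c = '1' := by
  unfold pvBits8
  rw [if_neg (by omega : ¬ x < 0)]
  unfold pvPadTo
  refine ⟨by simp [pv_toDigits_ne_nil], ?_⟩
  intro c hc
  rcases List.mem_append.mp hc with h | h
  · left; exact (List.eq_of_mem_replicate h)
  · exact pv_toDigits_binary _ c h

lemma pv_bits8_shape_neg (x : Int) (h : x < 0) :
    ∃ t, pvBits8 x = '-' :: t ∧ t ≠ [] ∧ ∀ c ∈ t, c = '0' ∨ c = '1' := by
  unfold pvBits8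
  rw [if_pos h]
  refine ⟨_, rfl, ?_, ?_⟩
  · unfold pvPadTo; simp [pv_toDigits_ne_nil]
  · intro c hc
    unfold pvPadTo at hc
    rcases List.mem_append.mp hc with h | h
    · left; exact (List.eq_of_mem_replicate h)
    · exact pv_toDigits_binary _ c h

lemma pv_octets_all_nonneg : ∀ (parts : List String),
    (∀ p ∈ parts, ∃ x, PySem.Int.ofStr? p = some x ∧ 0 ≤ x) →
    ∃ bits, pvOctetsBits? parts = some bits ∧ ∀ c ∈ bits, c = '0' ∨ c = '1' := by
  intro parts
  induction parts with
  | nil => intro _; exact ⟨[], rfl, by simp⟩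
  | cons p rest ih =>
    intro h
    obtain ⟨x, hx, hx0⟩ := h p (by simp)
    obtain ⟨bR, hbR, hbinR⟩ := ih (fun q hq => h q (by simp [hq]))
    refine ⟨pvBits8 x ++ bR, ?_, ?_⟩
    · simp [pvOctetsBits?, hx, hbR]
    · intro c hc
      rcases List.mem_append.mp hc with h' | h'
      · exact (pv_bits8_shape_nonneg x hx0).2 c h'
      · exact hbinR c h'

lemma pv_go_ne_nil : ∀ (fuel : Nat) (l cur : List Char) (acc : List (List Char)),
    PySem.Chars.splitOn.go ['.'] fuel l cur acc ≠ [] := by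
  intro fuel
  induction fuel with
  | zero =>
    intro l cur acc
    rw [PySem.Chars.splitOn.go.eq_def]
    simp
  | succ f ih =>
    intro l cur acc
    rw [PySem.Chars.splitOn.go.eq_def]
    rcases l with _ | ⟨c, rest⟩
    · simp
    · show (if ['.'].isPrefixOf (c :: rest) = true then
          PySem.Chars.splitOn.go ['.'] f (List.drop ['.'].length (c :: rest)) [] (cur.reverse :: acc)
        else PySem.Chars.splitOn.go ['.'] f rest (c :: cur) acc) ≠ []
      split_ifs <;> exact ih _ _ _

lemma pv_splitOn_ne_nil (cs : List Char) : PySem.Chars.splitOn cs ['.'] ≠ [] := by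
  unfold PySem.Chars.splitOn
  exact pv_go_ne_nil _ _ _ _

-- the closed-form precondition really admits only begin strings that parse
lemma pv_pre_parse (s : String)
    (h1 : ∀ p ∈ (PySem.Str.split? s ".").getD [], (PySem.Int.ofStr? p).isSome = true)
    (h2 : ∀ p ∈ ((PySem.Str.split? s ".").getD []).tail, 0 ≤ (PySem.Int.ofStr? p).getD 0) :
    (pvParse? s).isSome = true := by
  have hsplit : PySem.Str.split? s "." =
      some ((PySem.Chars.splitOn s.toList ['.']).map String.ofList) := by
    simp [PySem.Str.split?, PySem.Chars.split?]
  rw [hsplit] at h1 h2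
  simp only [Option.getD_some] at h1 h2
  obtain ⟨p, rest, hpr⟩ := List.exists_cons_of_ne_nil
    (show (PySem.Chars.splitOn s.toList ['.']).map String.ofList ≠ [] by
      simp [pv_splitOn_ne_nil])
  rw [hpr] at h1 h2
  obtain ⟨x, hx⟩ := Option.isSome_iff_exists.mp (h1 p (by simp))
  have hrest : ∀ q ∈ rest, ∃ y, PySem.Int.ofStr? q = some y ∧ 0 ≤ y := by
    intro q hq
    obtain ⟨y, hy⟩ := Option.isSome_iff_exists.mp (h1 q (by simp [hq]))
    have := h2 q (by simpa using hq)
    rw [hy] at this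
    exact ⟨y, hy, by simpa using this⟩
  obtain ⟨bR, hbR, hbinR⟩ := pv_octets_all_nonneg rest hrest
  have hOB : pvOctetsBits? (p :: rest) = some (pvBits8 x ++ bR) := by
    simp [pvOctetsBits?, hx, hbR]
  unfold pvParse?
  rw [hsplit, hpr]
  show (match pvOctetsBits? (p :: rest) with
        | none => none
        | some bits => pvInt2? bits).isSome = true
  rw [hOB]
  show (pvInt2? (pvBits8 x ++ bR)).isSome = true
  by_cases hxs : 0 ≤ x
  · obtain ⟨hne, hbin⟩ := pv_bits8_shape_nonneg x hxs
    obtain ⟨c, t, hct⟩ := List.exists_cons_of_ne_nil hne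
    have hc : c = '0' ∨ c = '1' := hbin c (by simp [hct])
    have hcne : c ≠ '-' := by rcases hc with h | h <;> rw [h] <;> decide
    have hall : ((c :: (t ++ bR)).all (fun c => c = '0' || c = '1')) = true := by
      simp only [List.all_eq_true]
      intro a ha
      rcases List.mem_cons.mp ha with rfl | ha
      · rcases hc with h | h <;> simp [h]
      · rcases List.mem_append.mp ha with h' | h'
        · have := hbin a (by simp [hct, h']); rcases this with h | h <;> simp [h]
        · have := hbinR a h'; rcases this with h | h <;> simp [h]
    rw [hct, List.cons_append, pvInt2?, if_neg hcne, pvBinDigits?,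
        if_pos ⟨by simp, hall⟩]
    simp
  · obtain ⟨t, hct, htne, htbin⟩ := pv_bits8_shape_neg x (by omega)
    have hall : (((t ++ bR)).all (fun c => c = '0' || c = '1')) = true := by
      simp only [List.all_eq_true]
      intro a ha
      rcases List.mem_append.mp ha with h' | h'
      · have := htbin a h'; rcases this with h | h <;> simp [h]
      · have := hbinR a h'; rcases this with h | h <;> simp [h]
    rw [hct, List.cons_append, pvInt2?, if_pos rfl, pvBinDigits?,
        if_pos ⟨by simp [htne], hall⟩]
    simp

-- ===== VERDICT (by name: the statement is the Claim_ definition above) =====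
theorem ipv4_address_generator_spec : Claim_equal_ipv4_address_generator := by
  intro n b mask hdom hpre
  show ipv4_address_generator n b mask = ipv4_address_generator_alt n b mask
  unfold ipv4_address_generator
  by_cases hn : 0 < n
  · rcases hpre with hle | ⟨hm, h1, h2⟩
    · omega
    · have hsome := pv_pre_parse b h1 h2
      obtain ⟨base, hbase⟩ := Option.isSome_iff_exists.mp hsome
      obtain ⟨k, hk⟩ : ∃ k, n.toNat = k + 1 := ⟨n.toNat - 1, by omega⟩
      have hinc : pvInc? mask b = some (pvFmtA (base + 2 ^ (32 - mask).toNat)) := by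
        unfold pvInc?
        rw [hbase]
        simp [hm, pv_one_shl]
      rw [hk, ipv4AGo, hinc]
      show b :: ipv4AGo mask k (pvFmtA (base + 2 ^ (32 - mask).toNat)) =
        ipv4_address_generator_alt n b mask
      rw [pv_goA mask hm k (base + 2 ^ (32 - mask).toNat)]
      unfold ipv4_address_generator_alt
      rw [if_pos (by omega : n > 0), hbase]
      simp only [if_pos hm, pv_one_shlN]
      rw [PySem.List.pyRange_one, show ((n - 1).toNat) = k by omega, List.map_map]
      congr 1
      apply List.map_congr_left
      intro j hj
      simp only [Function.comp_apply]
      congr 2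
      ring
  · unfold ipv4_address_generator_alt
    rw [if_neg (by omega : ¬ n > 0), show n.toNat = 0 by omega]
    rfl
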